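-- pv_equiv track=rewrite | github.com/Bidyasagar60/Self-Learning | TwoCharacters.py | givelength
-- ===== SOURCE A (Python) =====
-- def givelength(C1,C2,text):
--
--     maxcount=0
--
--     lasttext=''
--
--     for char in text:
--         if char==C1 or char==C2:
--             if char != lasttext:
--                 maxcount+=1
--                 if char==C1:
--                     lasttext=C1
--                 else:
--                     lasttext=C2
--             else:
--                 return 0
--
--     return maxcount
-- ===== SOURCE B (Python) =====
-- def givelength(C1, C2, text):
--     filtered = [c for c in text if c == C1 or c == C2]
--     if any(a == b for a, b in zip(filtered, filtered[1:])):
--         return 0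
--     return len(filtered)
-- ===== Notes on version B (the rewrite author's own statement) =====
-- stated objective: simpler
-- what changed: B splits A's single fused loop (running count + last-seen state + early return) into two independent passes: filter the matching characters, then check adjacent duplicates with zip and return the filtered length.
import Mathlib
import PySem

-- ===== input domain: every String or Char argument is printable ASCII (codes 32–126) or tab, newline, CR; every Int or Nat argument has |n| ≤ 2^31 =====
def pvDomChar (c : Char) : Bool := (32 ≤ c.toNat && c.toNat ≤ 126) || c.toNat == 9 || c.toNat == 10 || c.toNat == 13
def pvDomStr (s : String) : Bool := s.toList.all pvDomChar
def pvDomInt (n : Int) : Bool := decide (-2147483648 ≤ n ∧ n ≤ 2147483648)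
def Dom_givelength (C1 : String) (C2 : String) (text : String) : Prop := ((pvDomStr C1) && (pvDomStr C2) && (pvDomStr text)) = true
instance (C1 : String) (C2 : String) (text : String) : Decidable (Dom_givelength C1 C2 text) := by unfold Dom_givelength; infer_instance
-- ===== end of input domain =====

-- B replaces A's single fused loop (count + last-seen state + early return) by two passes:
-- filter the matching characters, then a zip-based adjacent-duplicate check; objective: simpler.


-- ===== PORT A =====
-- 'for char in text' with early 'return 0': structural recursion over text.toList,
-- state (maxcount, lasttext); a one-char Python string 'char' is String.ofList [c].
def givelengthLoopA (C1 : String) (C2 : String) : List Char → Int → String → Int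
  | [], maxcount, _ => maxcount
  | c :: rest, maxcount, lasttext =>
    if String.ofList [c] = C1 ∨ String.ofList [c] = C2 then
      if String.ofList [c] ≠ lasttext then
        givelengthLoopA C1 C2 rest (maxcount + 1) (if String.ofList [c] = C1 then C1 else C2)
      else 0
    else givelengthLoopA C1 C2 rest maxcount lasttext

def givelength (C1 : String) (C2 : String) (text : String) : Int :=
  givelengthLoopA C1 C2 text.toList 0 ""

-- ===== PORT B =====
def givelength_alt (C1 : String) (C2 : String) (text : String) : Int :=
  let filtered := text.toList.filter (fun c => String.ofList [c] = C1 ∨ String.ofList [c] = C2)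
  if (filtered.zip filtered.tail).any (fun p => p.1 == p.2) then 0
  else (filtered.length : Int)

-- ===== PRECONDITION & SPEC =====
def Spec_givelength (C1 : String) (C2 : String) (text : String) (out : Int) : Prop := out = givelength_alt C1 C2 text
instance (C1 : String) (C2 : String) (text : String) (out : Int) : Decidable (Spec_givelength C1 C2 text out) := by unfold Spec_givelength; infer_instance

-- ===== CLAIM (what is proved, stated in full; the proofs are below) =====
def Claim_equal_givelength : Prop := ∀ (C1 : String) (C2 : String) (text : String), Dom_givelength C1 C2 text → Spec_givelength C1 C2 text (givelength C1 C2 text)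

-- ===== LEMMAS AND PROOFS =====

-- 'there are two equal adjacent elements', head-first form
def adjEq : List Char → Bool
  | a :: b :: r => a == b || adjEq (b :: r)
  | _ => false

lemma mk_single_inj {a b : Char} (h : String.ofList [a] = String.ofList [b]) : a = b := by
  have := congrArg String.toList h
  simp at this
  exact this

-- A's loop, after its state 'lasttext' has become the string of a seen char a,
-- computes 0 iff a::filtered-rest has an adjacent duplicate, else count + length.
lemma loopA_char (C1 C2 : String) (l : List Char) : ∀ (a : Char) (mc : Int),
    (String.ofList [a] = C1 ∨ String.ofList [a] = C2) →
    givelengthLoopA C1 C2 l mc (String.ofList [a]) =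
      (if adjEq (a :: l.filter (fun c => String.ofList [c] = C1 ∨ String.ofList [c] = C2)) then 0
       else mc + ((l.filter (fun c => String.ofList [c] = C1 ∨ String.ofList [c] = C2)).length : Int)) := by
  induction l with
  | nil => intro a mc _; simp [givelengthLoopA, adjEq]
  | cons c rest ih =>
    intro a mc ha
    by_cases hc : String.ofList [c] = C1 ∨ String.ofList [c] = C2
    · by_cases hca : c = a
      · subst hca
        simp [givelengthLoopA, hc, List.filter_cons, adjEq]
      · have hne : String.ofList [c] ≠ String.ofList [a] := fun h => hca (mk_single_inj h)
        have hlast : (if String.ofList [c] = C1 then C1 else C2) = String.ofList [c] := by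
          split_ifs with h1
          · exact h1.symm
          · rcases hc with h | h
            · exact absurd h h1
            · exact h.symm
        rw [show givelengthLoopA C1 C2 (c :: rest) mc (String.ofList [a]) =
              givelengthLoopA C1 C2 rest (mc + 1) (if String.ofList [c] = C1 then C1 else C2) by
              simp [givelengthLoopA, hc, hne]]
        rw [hlast, ih c (mc + 1) hc]
        have hfc : List.filter (fun c => decide (String.ofList [c] = C1 ∨ String.ofList [c] = C2)) (c :: rest)
            = c :: List.filter (fun c => decide (String.ofList [c] = C1 ∨ String.ofList [c] = C2)) rest := by
          simp [List.filter_cons, hc]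
        rw [hfc]
        have hac : (a == c) = false := beq_eq_false_iff_ne.mpr (fun h => hca (Eq.symm h))
        have hadj : adjEq (a :: c :: List.filter (fun c => decide (String.ofList [c] = C1 ∨ String.ofList [c] = C2)) rest)
            = adjEq (c :: List.filter (fun c => decide (String.ofList [c] = C1 ∨ String.ofList [c] = C2)) rest) := by
          simp [adjEq, hac]
        rw [hadj]
        split_ifs with h1
        · rfl
        · simp only [List.length_cons]; push_cast; ring
    · have := ih a mc ha
      simp only [givelengthLoopA, hc, if_neg, List.filter_cons] at *
      simpa [hc] using this

-- initial state "": the first matching char never equals "" (length 1 vs 0)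
lemma mk_single_ne_empty (a : Char) : String.ofList [a] ≠ "" := by
  intro h
  have h2 := congrArg String.toList h
  simp at h2

lemma loopA_empty (C1 C2 : String) (l : List Char) :
    givelengthLoopA C1 C2 l 0 "" =
      (if adjEq (l.filter (fun c => String.ofList [c] = C1 ∨ String.ofList [c] = C2)) then 0
       else ((l.filter (fun c => String.ofList [c] = C1 ∨ String.ofList [c] = C2)).length : Int)) := by
  induction l with
  | nil => simp [givelengthLoopA, adjEq]
  | cons c rest ih =>
    by_cases hc : String.ofList [c] = C1 ∨ String.ofList [c] = C2
    · have hne : String.ofList [c] ≠ "" := mk_single_ne_empty c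
      have hlast : (if String.ofList [c] = C1 then C1 else C2) = String.ofList [c] := by
        split_ifs with h1
        · exact h1.symm
        · rcases hc with h | h
          · exact absurd h h1
          · exact h.symm
      rw [show givelengthLoopA C1 C2 (c :: rest) 0 "" =
            givelengthLoopA C1 C2 rest 1 (if String.ofList [c] = C1 then C1 else C2) by
            simp [givelengthLoopA, hc, hne]]
      rw [hlast, loopA_char C1 C2 rest c 1 hc]
      have hfc : List.filter (fun c => decide (String.ofList [c] = C1 ∨ String.ofList [c] = C2)) (c :: rest)
          = c :: List.filter (fun c => decide (String.ofList [c] = C1 ∨ String.ofList [c] = C2)) rest := by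
        simp [List.filter_cons, hc]
      rw [hfc]
      split_ifs with h1
      · rfl
      · simp only [List.length_cons]; push_cast; ring
    · simpa [givelengthLoopA, hc, List.filter_cons] using ih

-- adjEq is B's zip-any
lemma adjEq_eq_zip_any (l : List Char) :
    adjEq l = (l.zip l.tail).any (fun p => p.1 == p.2) := by
  induction l with
  | nil => simp [adjEq]
  | cons a r ih =>
    cases r with
    | nil => simp [adjEq]
    | cons b s =>
      rw [adjEq, ih]
      simp [List.zip]

-- ===== VERDICT (by name: the statement is the Claim_ definition above) =====
theorem givelength_spec : Claim_equal_givelength := by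
  intro C1 C2 text _
  unfold Spec_givelength givelength givelength_alt
  rw [loopA_empty, adjEq_eq_zip_any]
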